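-- pv_equiv track=rewrite | github.com/DanielRiha8906/AOC | Day_2/star_2.py | find_problematic_element
-- ===== SOURCE A (Python) =====
-- def is_increasing(input):
--     for i in range(len(input) - 1):
--         if input[i] >= input[i + 1]:
--             return False
--     return True
--
-- def is_decreasing(input):
--     for i in range(len(input) - 1):
--         if input[i] <= input[i + 1]:
--             return False
--     return True
--
-- def range_of_increase(input):
--     for i in range(len(input) - 1):
--         if abs(input[i] - input[i + 1]) < 1 or abs(input[i] - input[i + 1]) > 3:
--             return False
--     return True
--
-- def validate(report):
--     return ((is_increasing(report) or is_decreasing(report)) and range_of_increase(report))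
--
-- def find_problematic_element(full_list):
--     index = 0
--     for element in full_list:
--         temp_list = full_list.copy()
--         temp_list.pop(index)
--         index += 1
--         if validate(temp_list):
--             return element
--     return None
-- ===== SOURCE B (Python) =====
-- def find_problematic_element(full_list):
--     # O(n): locate the first adjacent pair violating the "increasing by 1..3"
--     # rule and the first violating the "decreasing by 1..3" rule; only removing
--     # an element of one of those pairs can make the report valid, so test just
--     # those (at most four) candidate indices in ascending order.
--     def good_inc(a, b):
--         return 1 <= b - a <= 3
--
--     def good_dec(a, b):
--         return 1 <= a - b <= 3
--
--     def first_bad(good):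
--         for i, (a, b) in enumerate(zip(full_list, full_list[1:])):
--             if not good(a, b):
--                 return i
--         return None
--
--     def ok(lst):
--         pairs = list(zip(lst, lst[1:]))
--         return all(good_inc(a, b) for a, b in pairs) or \
--                all(good_dec(a, b) for a, b in pairs)
--
--     j = first_bad(good_inc)
--     k = first_bad(good_dec)
--     if j is None or k is None:
--         return full_list[0] if full_list else None
--     lo, hi = min(j, k), max(j, k)
--     for i in (lo, lo + 1, hi, hi + 1):
--         if ok(full_list[:i] + full_list[i + 1:]):
--             return full_list[i]
--     return None
-- ===== Notes on version B (the rewrite author's own statement) =====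
-- stated objective: faster
-- what changed: Instead of re-validating the whole report for every removal index (quadratic), B locates the first adjacent pair violating the increasing rule and the first violating the decreasing rule, and tests only the at-most-four removal indices touching those pairs (single pass plus O(1) validations).
import Mathlib
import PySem

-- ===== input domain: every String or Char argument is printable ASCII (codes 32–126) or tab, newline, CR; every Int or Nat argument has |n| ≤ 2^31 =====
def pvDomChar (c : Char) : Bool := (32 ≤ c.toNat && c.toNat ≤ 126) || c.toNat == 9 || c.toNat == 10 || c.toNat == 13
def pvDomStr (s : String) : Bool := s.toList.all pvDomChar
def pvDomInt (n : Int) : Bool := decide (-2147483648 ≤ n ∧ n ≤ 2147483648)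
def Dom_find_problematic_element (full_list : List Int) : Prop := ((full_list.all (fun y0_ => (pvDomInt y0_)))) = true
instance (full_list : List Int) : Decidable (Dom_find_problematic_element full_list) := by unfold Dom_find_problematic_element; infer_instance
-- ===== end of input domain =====

-- B replaces A's try-every-removal scan (re-validating the whole list for each index) by an
-- O(n) search: it finds the first adjacent pair violating each monotonicity rule and tests
-- only the (at most four) removal indices that can possibly repair the report.


-- ===== PORT A =====
-- 'for i in range(len(input)-1): if cond: return False / return True' is the same as
-- 'all indices satisfy ¬cond'; indices are always in range, so pyGetD's default is never used.
def is_increasing (input : List Int) : Bool :=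
  (PySem.List.pyRange 0 (PySem.List.len input - 1) 1).all
    (fun i => !decide (PySem.List.pyGetD input i 0 ≥ PySem.List.pyGetD input (i + 1) 0))

def is_decreasing (input : List Int) : Bool :=
  (PySem.List.pyRange 0 (PySem.List.len input - 1) 1).all
    (fun i => !decide (PySem.List.pyGetD input i 0 ≤ PySem.List.pyGetD input (i + 1) 0))

def range_of_increase (input : List Int) : Bool :=
  (PySem.List.pyRange 0 (PySem.List.len input - 1) 1).all
    (fun i => !(decide (|PySem.List.pyGetD input i 0 - PySem.List.pyGetD input (i + 1) 0| < 1) ||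
                decide (|PySem.List.pyGetD input i 0 - PySem.List.pyGetD input (i + 1) 0| > 3)))

def validate (report : List Int) : Bool :=
  (is_increasing report || is_decreasing report) && range_of_increase report

-- the 'for element in full_list' loop carrying 'index'; temp_list = copy + pop(index)
def fpeAux (full : List Int) : List Int → Int → Option Int
  | [], _ => none
  | e :: rest, index =>
    match PySem.List.pop? full index with
    | none => none   -- IndexError; unreachable, the index is always in range
    | some (_, temp) => if validate temp then some e else fpeAux full rest (index + 1)

def find_problematic_element (full_list : List Int) : Option Int :=
  fpeAux full_list full_list 0

-- ===== PORT B =====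
def goodInc (a b : Int) : Bool := decide (1 ≤ b - a) && decide (b - a ≤ 3)

def goodDec (a b : Int) : Bool := decide (1 ≤ a - b) && decide (a - b ≤ 3)

-- all(good(a,b) for a,b in zip(lst, lst[1:]))
def pairsAllB (f : Int → Int → Bool) (l : List Int) : Bool :=
  (l.zip l.tail).all (fun p => f p.1 p.2)

def okAlt (l : List Int) : Bool := pairsAllB goodInc l || pairsAllB goodDec l

-- full_list[:i] + full_list[i+1:] for 0 ≤ i is exactly take i ++ drop (i+1) (PySem.List.slice_natCast);
-- candidate indices are < len, so getD's default is never used (full_list[i]).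
def find_problematic_element_alt (full_list : List Int) : Option Int :=
  match (full_list.zip full_list.tail).findIdx? (fun p => !goodInc p.1 p.2),
        (full_list.zip full_list.tail).findIdx? (fun p => !goodDec p.1 p.2) with
  | some j, some k =>
    ([min j k, min j k + 1, max j k, max j k + 1].find?
        (fun i => okAlt (full_list.take i ++ full_list.drop (i + 1)))).map
      (fun i => full_list.getD i 0)
  | _, _ => full_list.head?

-- ===== PRECONDITION & SPEC =====
def Spec_find_problematic_element (full_list : List Int) (out : Option Int) : Prop := out = find_problematic_element_alt full_list
instance (full_list : List Int) (out : Option Int) : Decidable (Spec_find_problematic_element full_list out) := by unfold Spec_find_problematic_element; infer_instance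

-- ===== CLAIM (what is proved, stated in full; the proofs are below) =====
def Claim_equal_find_problematic_element : Prop := ∀ (full_list : List Int), Dom_find_problematic_element full_list → Spec_find_problematic_element full_list (find_problematic_element full_list)

-- ===== LEMMAS AND PROOFS =====

-- the index whose removal both programs test: okAlt of the list with index i erased
def validIdx (l : List Int) (i : Nat) : Bool := okAlt (l.eraseIdx i)

-- pairwise-all as a ∀ over adjacent positions
theorem pairsAll_iff (f : Int → Int → Bool) (l : List Int) :
    pairsAllB f l = true ↔ ∀ (i : Nat) (h : i + 1 < l.length), f l[i] l[i + 1] = true := by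
  induction l with
  | nil => simp [pairsAllB]
  | cons a t ih =>
    cases t with
    | nil => simp [pairsAllB]
    | cons b r =>
      have hstep : pairsAllB f (a :: b :: r) = (f a b && pairsAllB f (b :: r)) := by
        simp [pairsAllB]
      rw [hstep]
      constructor
      · intro h i hi
        have h' := Bool.and_elim_left h
        have h'' := Bool.and_elim_right h
        match i with
        | 0 => simpa using h'
        | Nat.succ i =>
          have := (ih.mp h'') i (by simpa using hi)
          simpa using this
      · intro h
        refine Bool.and_intro ?_ (ih.mpr ?_)
        · simpa using h 0 (by simp)
        · intro i hi
          have := h (i + 1) (by simpa using hi)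
          simpa using this

-- A's index loop over range(len(l)-1) is pairwise-all
theorem rangeAll_eq (f : Int → Int → Bool) (l : List Int) :
    (List.range (l.length - 1)).all (fun k => f (l.getD k 0) (l.getD (k + 1) 0)) =
      pairsAllB f l := by
  induction l with
  | nil => simp [pairsAllB]
  | cons a t ih =>
    cases t with
    | nil => simp [pairsAllB]
    | cons b r =>
      have hstep : pairsAllB f (a :: b :: r) = (f a b && pairsAllB f (b :: r)) := by
        simp [pairsAllB]
      rw [hstep, ← ih]
      simp only [List.length_cons, Nat.add_sub_cancel, List.range_succ_eq_map, List.all_cons,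
        List.all_map]
      simp [Function.comp_def]

theorem loopAll_eq (f : Int → Int → Bool) (l : List Int) :
    ((PySem.List.pyRange 0 (PySem.List.len l - 1) 1).all
      (fun i => f (PySem.List.pyGetD l i 0) (PySem.List.pyGetD l (i + 1) 0))) =
      pairsAllB f l := by
  rw [PySem.List.pyRange_one, ← rangeAll_eq f l]
  have hn : ((PySem.List.len l - 1 - 0).toNat) = l.length - 1 := by
    simp [PySem.List.len_eq]
  rw [hn, List.all_map]
  refine List.all_congr rfl fun k => ?_
  have h1 : ((0 : Int) + (k : Int)) = ((k : Nat) : Int) := by ring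
  have h2 : ((0 : Int) + (k : Int) + 1) = (((k + 1 : Nat)) : Int) := by push_cast; ring
  simp only [Function.comp_def]
  rw [h2, h1]
  simp only [PySem.List.pyGetD_natCast]

-- pointwise: "strictly increasing and |step| in 1..3" is "step in 1..3"
theorem point_inc (a b : Int) :
    ((!decide (a ≥ b)) = true ∧ (!(decide (|a - b| < 1) || decide (|a - b| > 3))) = true) ↔
      goodInc a b = true := by
  simp only [goodInc, Bool.not_eq_eq_eq_not, Bool.not_true, decide_eq_false_iff_not,
    Bool.or_eq_false_iff, Bool.and_eq_true, decide_eq_true_eq]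
  rcases abs_cases (a - b) with ⟨h1, h2⟩ | ⟨h1, h2⟩ <;> omega

theorem point_dec (a b : Int) :
    ((!decide (a ≤ b)) = true ∧ (!(decide (|a - b| < 1) || decide (|a - b| > 3))) = true) ↔
      goodDec a b = true := by
  simp only [goodDec, Bool.not_eq_eq_eq_not, Bool.not_true, decide_eq_false_iff_not,
    Bool.or_eq_false_iff, Bool.and_eq_true, decide_eq_true_eq]
  rcases abs_cases (a - b) with ⟨h1, h2⟩ | ⟨h1, h2⟩ <;> omega

theorem validate_eq_okAlt (l : List Int) : validate l = okAlt l := by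
  have hinc : is_increasing l = pairsAllB (fun a b => !decide (a ≥ b)) l :=
    loopAll_eq (fun a b => !decide (a ≥ b)) l
  have hdec : is_decreasing l = pairsAllB (fun a b => !decide (a ≤ b)) l :=
    loopAll_eq (fun a b => !decide (a ≤ b)) l
  have hrng : range_of_increase l =
      pairsAllB (fun a b => !(decide (|a - b| < 1) || decide (|a - b| > 3))) l :=
    loopAll_eq (fun a b => !(decide (|a - b| < 1) || decide (|a - b| > 3))) l
  rw [validate, okAlt, hinc, hdec, hrng, Bool.eq_iff_iff]
  simp only [Bool.and_eq_true, Bool.or_eq_true, pairsAll_iff]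
  constructor
  · rintro ⟨hmon | hmon, hrg⟩
    · exact Or.inl fun i h => (point_inc _ _).mp ⟨hmon i h, hrg i h⟩
    · exact Or.inr fun i h => (point_dec _ _).mp ⟨hmon i h, hrg i h⟩
  · rintro (hg | hg)
    · exact ⟨Or.inl fun i h => ((point_inc _ _).mpr (hg i h)).1,
        fun i h => ((point_inc _ _).mpr (hg i h)).2⟩
    · exact ⟨Or.inr fun i h => ((point_dec _ _).mpr (hg i h)).1,
        fun i h => ((point_dec _ _).mpr (hg i h)).2⟩

-- minimum characterisation of find? over range n
theorem find?_range_some {p : Nat → Bool} {n a : Nat} :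
    (List.range n).find? p = some a ↔ a < n ∧ p a = true ∧ ∀ b, b < a → p b = false := by
  rw [List.find?_eq_some_iff_getElem]
  constructor
  · rintro ⟨hpa, i, hi, hieq, hj⟩
    rw [List.getElem_range] at hieq
    subst hieq
    refine ⟨by simpa using hi, hpa, fun b hb => ?_⟩
    have := hj b hb
    simpa using this
  · rintro ⟨han, hpa, hmin⟩
    refine ⟨hpa, a, by simpa using han, by simp, fun j hj => ?_⟩
    simp [hmin j hj]

-- scanning all indices < n equals scanning the (ordered, possibly overlapping) four candidates
theorem find4 {p : Nat → Bool} {lo hi n : Nat} (h1 : lo ≤ hi) (h2 : hi + 1 < n)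
    (hout : ∀ i, i < n → p i = true → i = lo ∨ i = lo + 1 ∨ i = hi ∨ i = hi + 1) :
    (List.range n).find? p = [lo, lo + 1, hi, hi + 1].find? p := by
  have hfalse : ∀ b, b < n → b ≠ lo → b ≠ lo + 1 → b ≠ hi → b ≠ hi + 1 → p b = false := by
    intro b hb n1 n2 n3 n4
    by_cases pb : p b = true
    · rcases hout b hb pb with h | h | h | h <;> simp_all
    · simpa using pb
  by_cases plo : p lo = true
  · rw [List.find?_cons_of_pos plo, find?_range_some]
    exact ⟨by omega, plo, fun b hb => hfalse b (by omega) (by omega) (by omega) (by omega) (by omega)⟩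
  · rw [List.find?_cons_of_neg plo]
    by_cases plo1 : p (lo + 1) = true
    · rw [List.find?_cons_of_pos plo1, find?_range_some]
      refine ⟨by omega, plo1, fun b hb => ?_⟩
      by_cases hblo : b = lo
      · subst hblo; simpa using plo
      · exact hfalse b (by omega) hblo (by omega) (by omega) (by omega)
    · rw [List.find?_cons_of_neg plo1]
      by_cases phi : p hi = true
      · rw [List.find?_cons_of_pos phi, find?_range_some]
        refine ⟨by omega, phi, fun b hb => ?_⟩
        by_cases hb1 : b = lo
        · subst hb1; simpa using plo
        by_cases hb2 : b = lo + 1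
        · subst hb2; simpa using plo1
        · exact hfalse b (by omega) hb1 hb2 (by omega) (by omega)
      · rw [List.find?_cons_of_neg phi]
        by_cases phi1 : p (hi + 1) = true
        · rw [List.find?_cons_of_pos phi1, find?_range_some]
          refine ⟨by omega, phi1, fun b hb => ?_⟩
          by_cases hb1 : b = lo
          · subst hb1; simpa using plo
          by_cases hb2 : b = lo + 1
          · subst hb2; simpa using plo1
          by_cases hb3 : b = hi
          · subst hb3; simpa using phi
          · exact hfalse b (by omega) hb1 hb2 hb3 (by omega)
        · rw [List.find?_cons_of_neg phi1, List.find?_nil, List.find?_eq_none]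
          intro x hx
          rw [List.mem_range] at hx
          by_cases hb1 : x = lo
          · subst hb1; simpa using plo
          by_cases hb2 : x = lo + 1
          · subst hb2; simpa using plo1
          by_cases hb3 : x = hi
          · subst hb3; simpa using phi
          by_cases hb4 : x = hi + 1
          · subst hb4; simpa using phi1
          · simp [hfalse x hx hb1 hb2 hb3 hb4]

-- only removing an endpoint of a violating pair can make the report valid
theorem valid_mem_cands {l : List Int} {j k i : Nat}
    (hj : j + 1 < l.length) (hk : k + 1 < l.length)
    (hbj : goodInc (l.getD j 0) (l.getD (j + 1) 0) = false)
    (hbk : goodDec (l.getD k 0) (l.getD (k + 1) 0) = false)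
    (hi : i < l.length) (hv : validIdx l i = true) :
    i = j ∨ i = j + 1 ∨ i = k ∨ i = k + 1 := by
  rw [List.getD_eq_getElem l 0 (show j < l.length by omega), List.getD_eq_getElem l 0 hj] at hbj
  rw [List.getD_eq_getElem l 0 (show k < l.length by omega), List.getD_eq_getElem l 0 hk] at hbk
  have hlen : (l.eraseIdx i).length = l.length - 1 := by
    rw [List.length_eraseIdx]; simp [hi]
  rw [validIdx, okAlt, Bool.or_eq_true] at hv
  rcases hv with hv | hv
  · -- the erased list is increasing by 1..3; i must touch the bad pair (j, j+1)
    have hall := (pairsAll_iff goodInc (l.eraseIdx i)).mp hv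
    have : ¬(i < j) ∧ ¬(j + 1 < i) := by
      constructor
      · intro hij
        have hb : (j - 1) + 1 < (l.eraseIdx i).length := by omega
        have := hall (j - 1) hb
        rw [List.getElem_eraseIdx, List.getElem_eraseIdx] at this
        rw [dif_neg (by omega), dif_neg (by omega)] at this
        have e1 : j - 1 + 1 = j := by omega
        simp only [e1] at this
        rw [hbj] at this
        exact Bool.false_ne_true this
      · intro hij
        have hb : j + 1 < (l.eraseIdx i).length := by omega
        have := hall j hb
        rw [List.getElem_eraseIdx, List.getElem_eraseIdx] at this
        rw [dif_pos (by omega), dif_pos (by omega)] at this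
        rw [hbj] at this
        exact Bool.false_ne_true this
    omega
  · have hall := (pairsAll_iff goodDec (l.eraseIdx i)).mp hv
    have : ¬(i < k) ∧ ¬(k + 1 < i) := by
      constructor
      · intro hik
        have hb : (k - 1) + 1 < (l.eraseIdx i).length := by omega
        have := hall (k - 1) hb
        rw [List.getElem_eraseIdx, List.getElem_eraseIdx] at this
        rw [dif_neg (by omega), dif_neg (by omega)] at this
        have e1 : k - 1 + 1 = k := by omega
        simp only [e1] at this
        rw [hbk] at this
        exact Bool.false_ne_true this
      · intro hik
        have hb : k + 1 < (l.eraseIdx i).length := by omega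
        have := hall k hb
        rw [List.getElem_eraseIdx, List.getElem_eraseIdx] at this
        rw [dif_pos (by omega), dif_pos (by omega)] at this
        rw [hbk] at this
        exact Bool.false_ne_true this
    omega

theorem pairsAll_tail {f : Int → Int → Bool} {l : List Int} (h : pairsAllB f l = true) :
    pairsAllB f l.tail = true := by
  cases l with
  | nil => simpa using h
  | cons a t =>
    cases t with
    | nil => simp [pairsAllB]
    | cons b r =>
      have hstep : pairsAllB f (a :: b :: r) = (f a b && pairsAllB f (b :: r)) := by
        simp [pairsAllB]
      rw [hstep] at h
      simpa using Bool.and_elim_right h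

-- A returns the first index (scanned in order) whose removal validates, mapped to its element
theorem fpeAux_eq (suf pre : List Int) :
    fpeAux (pre ++ suf) suf (pre.length : Int) =
      ((List.range' pre.length suf.length).find? (validIdx (pre ++ suf))).map
        (fun i => (pre ++ suf).getD i 0) := by
  induction suf generalizing pre with
  | nil => simp [fpeAux]
  | cons e rest ih =>
    have hlt : pre.length < (pre ++ e :: rest).length := by simp
    rw [fpeAux, PySem.List.pop?_natCast _ _ hlt]
    dsimp only
    have hel : (pre ++ e :: rest)[pre.length] = e := by
      rw [List.getElem_append_right (Nat.le_refl _)]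
      simp
    rw [validate_eq_okAlt]
    have hv : okAlt ((pre ++ e :: rest).eraseIdx pre.length) =
        validIdx (pre ++ e :: rest) pre.length := rfl
    rw [hv]
    rw [List.length_cons, List.range'_succ, List.find?_cons]
    by_cases hcase : validIdx (pre ++ e :: rest) pre.length = true
    · simp [hcase, hel]
    · rw [Bool.not_eq_true] at hcase
      simp only [hcase]
      have hres : pre ++ e :: rest = (pre ++ [e]) ++ rest := by simp
      have hlen : pre.length + 1 = (pre ++ [e]).length := by simp
      have hcast : (pre.length : Int) + 1 = (((pre ++ [e]).length : Nat) : Int) := by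
        rw [← hlen]; push_cast; ring
      rw [hres, hcast, ih (pre ++ [e]), ← hlen]
      simp

theorem A_char (l : List Int) :
    find_problematic_element l =
      ((List.range l.length).find? (validIdx l)).map (fun i => l.getD i 0) := by
  have := fpeAux_eq l []
  simpa [find_problematic_element, List.range_eq_range'] using this

-- facts extracted from a successful findIdx? over the zipped pairs
theorem bad_pair_of_findIdx? {g : Int → Int → Bool} {l : List Int} {j : Nat}
    (h : (l.zip l.tail).findIdx? (fun p => !g p.1 p.2) = some j) :
    j + 1 < l.length ∧ g (l.getD j 0) (l.getD (j + 1) 0) = false := by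
  obtain ⟨hlt, hp, -⟩ := List.findIdx?_eq_some_iff_getElem.mp h
  have hlen : (l.zip l.tail).length = l.length - 1 := by
    simp [List.length_zip, List.length_tail]
  have hj1 : j + 1 < l.length := by omega
  refine ⟨hj1, ?_⟩
  rw [List.getElem_zip] at hp
  rw [List.getElem_tail] at hp
  rw [List.getD_eq_getElem l 0 (show j < l.length by omega),
    List.getD_eq_getElem l 0 hj1]
  simpa using hp

theorem all_good_of_findIdx?_none {g : Int → Int → Bool} {l : List Int}
    (h : (l.zip l.tail).findIdx? (fun p => !g p.1 p.2) = none) : pairsAllB g l = true := by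
  rw [pairsAllB, List.all_eq_true]
  intro p hp
  have := List.findIdx?_eq_none_iff.mp h p hp
  simpa using this

-- if some monotone rule holds everywhere, removing the head keeps the report valid,
-- so index 0 is the first valid removal
theorem head_case {l : List Int}
    (hall : pairsAllB goodInc l = true ∨ pairsAllB goodDec l = true) :
    l.head? = ((List.range l.length).find? (validIdx l)).map (fun i => l.getD i 0) := by
  cases l with
  | nil => simp
  | cons a t =>
    have hv : validIdx (a :: t) 0 = true := by
      rw [validIdx, List.eraseIdx_cons_zero, okAlt, Bool.or_eq_true]
      rcases hall with h | h
      · exact Or.inl (pairsAll_tail h)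
      · exact Or.inr (pairsAll_tail h)
    rw [List.length_cons, List.range_succ_eq_map, List.find?_cons_of_pos hv]
    simp

theorem B_char (l : List Int) :
    find_problematic_element_alt l =
      ((List.range l.length).find? (validIdx l)).map (fun i => l.getD i 0) := by
  unfold find_problematic_element_alt
  have hpred : (fun i => okAlt (l.take i ++ l.drop (i + 1))) = validIdx l := by
    funext i
    rw [validIdx, List.eraseIdx_eq_take_drop_succ]
  cases hj : (l.zip l.tail).findIdx? (fun p => !goodInc p.1 p.2) with
  | none =>
    cases hk : (l.zip l.tail).findIdx? (fun p => !goodDec p.1 p.2) with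
    | none => exact head_case (Or.inl (all_good_of_findIdx?_none hj))
    | some k => exact head_case (Or.inl (all_good_of_findIdx?_none hj))
  | some j =>
    cases hk : (l.zip l.tail).findIdx? (fun p => !goodDec p.1 p.2) with
    | none => exact head_case (Or.inr (all_good_of_findIdx?_none hk))
    | some k =>
      obtain ⟨hj1, hbj⟩ := bad_pair_of_findIdx? hj
      obtain ⟨hk1, hbk⟩ := bad_pair_of_findIdx? hk
      have h4 := find4 (p := validIdx l) (lo := min j k) (hi := max j k) (n := l.length)
        min_le_max (by omega)
        (fun i hi hv => by have := valid_mem_cands hj1 hk1 hbj hbk hi hv; omega)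
      simp only [hpred, h4]

-- ===== VERDICT (by name: the statement is the Claim_ definition above) =====
theorem find_problematic_element_spec : Claim_equal_find_problematic_element := by
  intro l _
  unfold Spec_find_problematic_element
  rw [A_char, B_char]
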